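-- pv_equiv track=rewrite | github.com/jhigginsGH/Folder-Zipper-Application | funct.py | find_last_slash_index
-- ===== SOURCE A (Python) =====
-- def find_last_slash_index(filepath):
--
--     number_of_slashes = filepath.count('/')
--     slash_count = 0
--
--     for index, char in enumerate(filepath):
--         if char == '/':
--             slash_count +=1
--             if slash_count == number_of_slashes:
--                 return filepath[index:]
-- ===== SOURCE B (Python) =====
-- def find_last_slash_index(filepath):
--     for i in range(len(filepath) - 1, -1, -1):
--         if filepath[i] == '/':
--             return filepath[i:]
--     return None
-- ===== Notes on version B (the rewrite author's own statement) =====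
-- stated objective: simpler
-- what changed: Replaces A's two passes (count all slashes, then forward-scan counting up to that total) with a single right-to-left scan that returns at the first slash found from the end.
import Mathlib
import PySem

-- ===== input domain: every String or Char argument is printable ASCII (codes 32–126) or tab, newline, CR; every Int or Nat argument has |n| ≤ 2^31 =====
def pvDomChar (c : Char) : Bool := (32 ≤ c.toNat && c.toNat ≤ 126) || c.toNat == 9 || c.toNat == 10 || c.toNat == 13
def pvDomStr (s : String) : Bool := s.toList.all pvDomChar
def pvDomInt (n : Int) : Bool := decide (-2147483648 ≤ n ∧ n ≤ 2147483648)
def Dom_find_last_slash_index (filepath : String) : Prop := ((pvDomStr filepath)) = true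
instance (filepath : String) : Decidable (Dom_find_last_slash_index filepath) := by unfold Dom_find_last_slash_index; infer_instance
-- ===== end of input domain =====

-- B replaces A's two forward passes (count slashes, then scan counting up to the total)
-- with one right-to-left scan returning at the first slash found from the end (simpler).

-- ===== PORT A =====
-- the for-loop over enumerate(filepath) with the slash_count accumulator
def pvAGo (s : String) (n : Int) : List (Int × Char) → Int → Option String
  | [], _ => none
  | (i, c) :: rest, cnt =>
    if c = '/' then
      if cnt + 1 = n then some (PySem.Str.slice s (some i) none)
      else pvAGo s n rest (cnt + 1)
    else pvAGo s n rest cnt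

def find_last_slash_index (filepath : String) : Option String :=
  pvAGo filepath ((PySem.Str.count filepath "/" : Nat) : Int)
    (PySem.List.enumerate filepath.toList) 0

-- ===== PORT B =====
-- the for-loop over range(len(filepath)-1, -1, -1)
def pvBGo (s : String) : List Int → Option String
  | [] => none
  | i :: rest =>
    if PySem.Str.pyGet? s i = some '/' then some (PySem.Str.slice s (some i) none)
    else pvBGo s rest

def find_last_slash_index_alt (filepath : String) : Option String :=
  pvBGo filepath (PySem.List.pyRange ((PySem.Str.len filepath : Int) - 1) (-1) (-1))

-- ===== PRECONDITION & SPEC =====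
def Spec_find_last_slash_index (filepath : String) (out : Option String) : Prop := out = find_last_slash_index_alt filepath
instance (filepath : String) (out : Option String) : Decidable (Spec_find_last_slash_index filepath out) := by unfold Spec_find_last_slash_index; infer_instance

-- ===== CLAIM (what is proved, stated in full; the proofs are below) =====
def Claim_equal_find_last_slash_index : Prop := ∀ (filepath : String), Dom_find_last_slash_index filepath → Spec_find_last_slash_index filepath (find_last_slash_index filepath)

-- ===== LEMMAS AND PROOFS =====

-- index of the LAST '/' in a char list (proof-side reference)
def pvLastIdx : List Char → Option Nat
  | [] => none
  | c :: t =>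
    match pvLastIdx t with
    | some j => some (j + 1)
    | none => if c = '/' then some 0 else none

theorem pvLastIdx_none_iff (l : List Char) : pvLastIdx l = none ↔ l.count '/' = 0 := by
  induction l with
  | nil => simp [pvLastIdx]
  | cons c t ih =>
    simp only [pvLastIdx, List.count_cons]
    cases h : pvLastIdx t with
    | none =>
      rw [h] at ih
      simp only [true_iff] at ih
      by_cases hc : c = '/' <;> simp [hc, ih]
    | some j =>
      have : t.count '/' ≠ 0 := by
        intro h0
        rw [← ih] at h0
        simp [h] at h0
      constructor
      · intro h'; exact absurd h' (by simp)
      · intro h'; omega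

-- Chars.count.go for the single-character needle ['/'] is List.count '/'
theorem pvCountGo (fuel : Nat) : ∀ (l : List Char) (acc : Nat), l.length ≤ fuel →
    PySem.Chars.count.go ['/'] fuel l acc = acc + l.count '/' := by
  induction fuel with
  | zero =>
    intro l acc h
    have : l = [] := by cases l <;> simp_all
    subst this
    simp [PySem.Chars.count.go]
  | succ f ih =>
    intro l acc h
    cases l with
    | nil => simp [PySem.Chars.count.go]
    | cons c t =>
      rw [PySem.Chars.count.go]
      by_cases hc : c = '/'
      · have hp : List.isPrefixOf ['/'] (c :: t) = true := by
          simp [List.isPrefixOf, hc]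
        simp only [hp, List.length_singleton, List.drop_succ_cons, List.drop_zero]
        rw [ih t (acc + 1) (by simpa using Nat.le_of_succ_le_succ h)]
        simp [hc]
        omega
      · have hp : List.isPrefixOf ['/'] (c :: t) = false := by
          simp [List.isPrefixOf]
          exact fun h' => absurd h'.symm hc
        simp only [hp, Bool.false_eq_true, if_false]
        rw [ih t acc (by simpa using Nat.le_of_succ_le_succ h)]
        simp [hc]

theorem pvCountSlash (s : String) :
    PySem.Str.count s "/" = s.toList.count '/' := by
  rw [PySem.Str.count_eq]
  have : ("/" : String).toList = ['/'] := by decide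
  rw [this]
  rw [PySem.Chars.count]
  simp only [List.isEmpty_cons, Bool.false_eq_true, if_false]
  simpa using pvCountGo s.toList.length s.toList 0 le_rfl

-- A's loop over the suffix l (offset k, slashes seen so far cnt, target cnt + count l)
theorem pvAGo_spec (s : String) (l : List Char) : ∀ (k : Nat) (cnt : Int),
    pvAGo s (cnt + (l.count '/' : Int)) (PySem.List.enumerate l (k : Int)) cnt
      = (pvLastIdx l).map (fun j => PySem.Str.slice s (some ((k + j : Nat) : Int)) none) := by
  induction l with
  | nil => intro k cnt; simp [PySem.List.enumerate_nil, pvAGo, pvLastIdx]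
  | cons c t ih =>
    intro k cnt
    rw [PySem.List.enumerate_cons]
    by_cases hc : c = '/'
    · simp only [pvAGo, if_pos hc]
      by_cases h0 : t.count '/' = 0
      · have hn : pvLastIdx t = none := (pvLastIdx_none_iff t).mpr h0
        have : cnt + 1 = cnt + ((c :: t).count '/' : Int) := by
          simp [hc, h0]
        rw [if_pos this]
        simp [pvLastIdx, hn, hc]
      · have hcond : ¬ (cnt + 1 = cnt + ((c :: t).count '/' : Int)) := by
          simp [hc]
          omega
        rw [if_neg hcond]
        have hrw : cnt + ((c :: t).count '/' : Int) = (cnt + 1) + (t.count '/' : Int) := by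
          simp [hc]; omega
        rw [hrw]
        have hk : ((k : Int) + 1) = ((k + 1 : Nat) : Int) := by push_cast; ring
        rw [hk, ih (k + 1) (cnt + 1)]
        obtain ⟨j, hj⟩ := Option.ne_none_iff_exists'.mp
          (fun h => h0 ((pvLastIdx_none_iff t).mp h))
        simp only [pvLastIdx, hj, Option.map_some]
        have harith : k + 1 + j = k + (j + 1) := by omega
        rw [harith]
    · simp only [pvAGo, if_neg hc]
      have hrw : cnt + ((c :: t).count '/' : Int) = cnt + (t.count '/' : Int) := by
        simp [hc]
      rw [hrw]
      have hk : ((k : Int) + 1) = ((k + 1 : Nat) : Int) := by push_cast; ring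
      rw [hk, ih (k + 1) cnt]
      cases hj : pvLastIdx t with
      | none => simp [pvLastIdx, hj, hc]
      | some j =>
        simp only [pvLastIdx, hj, Option.map_some]
        have harith : k + 1 + j = k + (j + 1) := by omega
        rw [harith]

-- pvLastIdx from the right
theorem pvLastIdx_append_singleton (l : List Char) (c : Char) :
    pvLastIdx (l ++ [c]) = if c = '/' then some l.length else pvLastIdx l := by
  induction l with
  | nil => by_cases hc : c = '/' <;> simp [pvLastIdx, hc]
  | cons d t ih =>
    simp only [List.cons_append, pvLastIdx, ih]
    by_cases hc : c = '/'
    · simp [hc]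
    · simp only [if_neg hc]

-- the descending index list [n-1, …, 0]
def pvDesc (n : Nat) : List Int := (List.range n).map (fun k => ((n - 1 - k : Nat) : Int))

theorem pvDesc_succ (n : Nat) : pvDesc (n + 1) = (n : Int) :: pvDesc n := by
  simp only [pvDesc, List.range_succ_eq_map, List.map_cons, List.map_map]
  refine List.cons_eq_cons.mpr ⟨by simp, List.map_congr_left ?_⟩
  intro k _
  simp only [Function.comp]
  congr 1
  omega

-- B's loop over the descending indices of a prefix l of s
theorem pvBGo_spec (s : String) (l : List Char) (hpre : s.toList.take l.length = l) :
    pvBGo s (pvDesc l.length)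
      = (pvLastIdx l).map (fun j => PySem.Str.slice s (some ((j : Nat) : Int)) none) := by
  induction l using List.reverseRecOn with
  | nil => simp [pvDesc, pvBGo, pvLastIdx]
  | append_singleton t c ih =>
    have hlen : (t ++ [c]).length = t.length + 1 := by simp
    rw [hlen, pvDesc_succ]
    have hget : s.toList[t.length]? = some c := by
      have h1 : (s.toList.take (t.length + 1))[t.length]? = some c := by
        rw [hlen] at hpre; rw [hpre]; simp
      rwa [List.getElem?_take_of_lt (by omega)] at h1
    have hga : PySem.Str.pyGet? s ((t.length : Nat) : Int) = some c := by
      simp [hget]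
    rw [pvLastIdx_append_singleton]
    by_cases hc : c = '/'
    · subst hc
      simp [pvBGo, hget]
    · have hne : ¬ (PySem.Str.pyGet? s ((t.length : Nat) : Int) = some '/') := by
        rw [hga]; simp [hc]
      simp only [pvBGo, hne, if_false, if_neg hc]
      apply ih
      rw [hlen] at hpre
      calc s.toList.take t.length = (s.toList.take (t.length + 1)).take t.length := by
            rw [List.take_take]; congr 1; omega
        _ = t := by rw [hpre]; simp

theorem pvAlt_eq (s : String) :
    find_last_slash_index_alt s
      = (pvLastIdx s.toList).map (fun j => PySem.Str.slice s (some ((j : Nat) : Int)) none) := by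
  unfold find_last_slash_index_alt
  have hlen : PySem.Str.len s = s.toList.length := by
    simp [PySem.Str.len_eq]
  have hr : PySem.List.pyRange ((PySem.Str.len s : Int) - 1) (-1) (-1)
      = pvDesc s.toList.length := by
    rw [PySem.List.pyRange_neg_one, hlen]
    have h1 : ((s.toList.length : Int) - 1 - (-1)).toNat = s.toList.length := by omega
    rw [h1, pvDesc]
    apply List.map_congr_left
    intro k hk
    simp only [List.mem_range] at hk
    omega
  rw [hr]
  exact pvBGo_spec s s.toList (by simp)

-- ===== VERDICT (by name: the statement is the Claim_ definition above) =====
theorem find_last_slash_index_spec : Claim_equal_find_last_slash_index := by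
  intro s _
  unfold Spec_find_last_slash_index
  unfold find_last_slash_index
  rw [pvCountSlash, pvAlt_eq]
  have h0 : ((s.toList.count '/' : Nat) : Int) = (0 : Int) + (s.toList.count '/' : Int) := by
    omega
  rw [h0]
  have := pvAGo_spec s s.toList 0 0
  simp only [Nat.cast_zero] at this
  rw [this]
  simp
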